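-- pv_equiv track=rewrite | github.com/sportstensor/sportstensor | vali_utils/suspicious_utils.py | _build_relationships
-- ===== SOURCE A (Python) =====
-- from collections import defaultdict
--
-- def _build_relationships(duplicate_groups: dict) -> dict:
--     """
--     Build initial relationships between miners based on duplicate patterns.
--
--     Args:
--         duplicate_groups: Dictionary mapping pattern hash to list of miner IDs
--
--     Returns:
--         Dictionary mapping miner ID to set of related miner IDs
--     """
--     miner_relationships = defaultdict(set)
--
--     for miners in duplicate_groups.values():
--         for m1 in miners:
--             for m2 in miners:
--                 if m1 != m2:
--                     miner_relationships[m1].add(m2)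
--                     miner_relationships[m2].add(m1)
--
--     return miner_relationships
-- ===== SOURCE B (Python) =====
-- def _build_relationships(duplicate_groups: dict) -> dict:
--     """Two staged passes with an inverted index: pass 1 builds, without any set
--     operation, an index miner -> list of per-group co-member lists (chunks);
--     pass 2 materializes each miner's neighbour set once from its chunks."""
--     index = {}
--     for miners in duplicate_groups.values():
--         distinct = list(dict.fromkeys(miners))
--         if len(distinct) >= 2:
--             for m in distinct:
--                 index.setdefault(m, []).append([o for o in distinct if o != m])
--     return {m: {x for chunk in chunks for x in chunk} for m, chunks in index.items()}
-- ===== Notes on version B (the rewrite author's own statement) =====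
-- stated objective: alternative
-- what changed: A grows each miner's neighbour set incrementally, pair by pair over all ordered pairs of every raw group; B makes two staged passes: it first builds an inverted index miner -> list of per-group co-member lists using only list appends (no set operation), then materializes each miner's neighbour set once from its concatenated chunks.
import Mathlib
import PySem

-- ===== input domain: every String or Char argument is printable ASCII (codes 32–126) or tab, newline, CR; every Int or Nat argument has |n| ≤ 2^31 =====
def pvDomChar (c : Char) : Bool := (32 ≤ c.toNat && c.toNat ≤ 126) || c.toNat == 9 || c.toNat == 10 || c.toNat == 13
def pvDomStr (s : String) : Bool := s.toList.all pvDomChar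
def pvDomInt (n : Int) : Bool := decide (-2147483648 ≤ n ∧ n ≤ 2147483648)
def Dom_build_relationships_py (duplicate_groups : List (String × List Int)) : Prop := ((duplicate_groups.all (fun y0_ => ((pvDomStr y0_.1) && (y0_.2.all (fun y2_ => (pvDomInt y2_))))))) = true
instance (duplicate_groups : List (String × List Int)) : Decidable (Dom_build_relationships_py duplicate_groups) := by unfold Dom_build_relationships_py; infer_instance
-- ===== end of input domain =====

-- B replaces A's incremental pair-by-pair set growth by two staged passes: an inverted index
-- miner → list of per-group co-member lists built with list appends only, then one
-- materialization of each miner's set from its chunks (objective: alternative).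

-- ===== PORT A =====
-- 'miner_relationships[m1].add(m2)' on a defaultdict(set) reads the key's set (creating an
-- empty one, appended at the end, if absent) and adds one element: exactly Dict.modify with default ∅.
def build_relationships_py (duplicate_groups : List (String × List Int)) : List (Int × List Int) :=
  (duplicate_groups.foldl
    (fun (rel : PySem.Dict Int (PySem.Set Int)) g =>
      g.2.foldl (fun rel m1 =>
        g.2.foldl (fun rel m2 =>
          if m1 ≠ m2 then
            (rel.modify m1 PySem.Set.empty (fun s => s.add m2)).modify m2 PySem.Set.empty
              (fun s => s.add m1)
          else rel) rel) rel)
    PySem.Dict.empty).items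

-- ===== PORT B =====
-- pass 1: 'index.setdefault(m, []).append(chunk)' creates the key with [] if absent (appended
-- at the end) and appends one chunk to that list in place: exactly Dict.insert of getD ++ [chunk].
-- pass 2: the dict comprehension '{m: {x for chunk in chunks for x in chunk} …}' maps each
-- index entry to the set of its flattened chunks: Set.ofList of the flattened chunk list.
def build_relationships_py_alt (duplicate_groups : List (String × List Int)) : List (Int × List Int) :=
  let index := duplicate_groups.foldl
    (fun (idx : PySem.Dict Int (List (List Int))) g =>
      let distinct := PySem.List.dedup g.2
      if 2 ≤ distinct.length then
        distinct.foldl (fun idx m =>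
          idx.insert m ((idx.getD m []) ++ [distinct.filter (fun o => o ≠ m)])) idx
      else idx)
    PySem.Dict.empty
  index.items.map (fun p => (p.1, PySem.Set.ofList p.2.flatten))

-- ===== PRECONDITION & SPEC =====
def Spec_build_relationships_py (duplicate_groups : List (String × List Int)) (out : List (Int × List Int)) : Prop := out = build_relationships_py_alt duplicate_groups
instance (duplicate_groups : List (String × List Int)) (out : List (Int × List Int)) : Decidable (Spec_build_relationships_py duplicate_groups out) := by unfold Spec_build_relationships_py; infer_instance

-- ===== CLAIM (what is proved, stated in full; the proofs are below) =====
def Claim_equal_build_relationships_py : Prop := ∀ (duplicate_groups : List (String × List Int)), Dom_build_relationships_py duplicate_groups → Spec_build_relationships_py duplicate_groups (build_relationships_py duplicate_groups)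

-- ===== LEMMAS AND PROOFS =====

-- The per-group loop bodies of the two ports, named for the proofs.
def pvStepA (rel : PySem.Dict Int (PySem.Set Int)) (L : List Int) : PySem.Dict Int (PySem.Set Int) :=
  L.foldl (fun rel m1 =>
    L.foldl (fun rel m2 =>
      if m1 ≠ m2 then
        (rel.modify m1 PySem.Set.empty (fun s => s.add m2)).modify m2 PySem.Set.empty
          (fun s => s.add m1)
      else rel) rel) rel

def pvStepI (idx : PySem.Dict Int (List (List Int))) (L : List Int) : PySem.Dict Int (List (List Int)) :=
  if 2 ≤ (PySem.List.dedup L).length then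
    (PySem.List.dedup L).foldl (fun idx m =>
      idx.insert m ((idx.getD m []) ++ [(PySem.List.dedup L).filter (fun o => o ≠ m)])) idx
  else idx

-- A's action stream for one group: every (key, added element) action in program order.
def pvBlock (m1 m2 : Int) : List (Int × Int) := if m1 ≠ m2 then [(m1, m2), (m2, m1)] else []

def pvPairs (L : List Int) : List (Int × Int) :=
  L.flatMap (fun m1 => L.flatMap (fun m2 => pvBlock m1 m2))

def pvProcess (rel : PySem.Dict Int (PySem.Set Int)) (ps : List (Int × Int)) : PySem.Dict Int (PySem.Set Int) :=
  ps.foldl (fun d p => d.modify p.1 PySem.Set.empty (fun s => s.add p.2)) rel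

-- pvSec k m1 m2: the elements the block (m1, m2) contributes to key k's set.
def pvSec (k m1 m2 : Int) : List Int :=
  if m1 ≠ m2 then (if m1 == k then [m2] else []) ++ (if m2 == k then [m1] else []) else []

-- ---------- Set-level facts ----------

theorem pv_update_congr {S : PySem.Set Int} {xs ys : List Int}
    (h : PySem.Set.ofList xs = PySem.Set.ofList ys) : S.update xs = S.update ys := by
  rw [PySem.Set.update_eq_append_filter, PySem.Set.update_eq_append_filter, h]

theorem pv_update_noop {S : PySem.Set Int} {xs : List Int}
    (h : ∀ x ∈ xs, x ∈ S) : S.update xs = S := by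
  rw [PySem.Set.update_eq_append_filter]
  have hnil : List.filter (fun y => !S.contains y) (PySem.Set.ofList xs) = [] := by
    rw [List.filter_eq_nil_iff]
    intro a ha
    have haxs : a ∈ xs := (PySem.Set.mem_ofList xs a).1 ha
    simpa [PySem.Set.contains_iff] using h a haxs
  rw [hnil, List.append_nil]

theorem pv_update_idem (S : PySem.Set Int) (xs : List Int) :
    (S.update xs).update xs = S.update xs :=
  pv_update_noop (fun x hx => (PySem.Set.mem_update S xs x).2 (Or.inr hx))

theorem pv_add_idem (S : PySem.Set Int) (x : Int) : (S.add x).add x = S.add x :=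
  PySem.Set.add_of_mem ((PySem.Set.mem_add S x x).2 (Or.inr rfl))

theorem pv_update_flatMap (f : Int → List Int) (L : List Int) (S : PySem.Set Int) :
    S.update (L.flatMap f) = L.foldl (fun S x => S.update (f x)) S := by
  induction L generalizing S with
  | nil => simp [PySem.Set.update_nil]
  | cons x L ih => rw [List.flatMap_cons, PySem.Set.update_append, List.foldl_cons, ih]

theorem pv_ofList_filter (p : Int → Bool) (L : List Int) :
    PySem.Set.ofList (L.filter p) = (PySem.Set.ofList L).filter p := by
  induction L with
  | nil => simp [PySem.Set.ofList_nil]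
  | cons x L ih =>
    by_cases hp : p x
    · rw [List.filter_cons_of_pos hp, PySem.Set.ofList_cons, PySem.Set.ofList_cons, ih,
        List.filter_cons_of_pos hp]
      show x :: ((PySem.Set.ofList L).filter p).filter (fun y => y != x) =
        x :: ((PySem.Set.ofList L).filter (fun y => y != x)).filter p
      rw [List.filter_comm]
    · rw [List.filter_cons_of_neg hp, PySem.Set.ofList_cons, ih, List.filter_cons_of_neg hp]
      show (PySem.Set.ofList L).filter p =
        ((PySem.Set.ofList L).filter (fun y => y != x)).filter p
      rw [List.filter_comm]
      symm
      apply List.filter_eq_self.2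
      intro a ha
      have hax : a ≠ x := by
        rintro rfl
        exact hp (List.of_mem_filter ha)
      simp [hax]

theorem pv_short_iff (L : List Int) :
    (PySem.Set.ofList L).length < 2 ↔ ∀ x ∈ L, ∀ y ∈ L, x = y := by
  constructor
  · intro h x hx y hy
    have hx' := (PySem.Set.mem_ofList L x).2 hx
    have hy' := (PySem.Set.mem_ofList L y).2 hy
    rcases hs : PySem.Set.ofList L with _ | ⟨a, t⟩
    · rw [hs] at hx'; cases hx'
    · rcases t with _ | ⟨b, t'⟩
      · rw [hs] at hx' hy'
        simp at hx' hy'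
        rw [hx', hy']
      · rw [hs] at h; simp at h
  · intro h
    rcases L with _ | ⟨x, L'⟩
    · simp [PySem.Set.ofList_nil]
    · rw [PySem.Set.ofList_cons]
      have hd : (PySem.Set.ofList L').discard x = [] := by
        show (PySem.Set.ofList L').filter (fun y => y != x) = []
        rw [List.filter_eq_nil_iff]
        intro a ha
        have haL : a ∈ L' := (PySem.Set.mem_ofList L' a).1 ha
        have hax : a = x := h a (List.mem_cons_of_mem _ haL) x List.mem_cons_self
        simp [hax]
      rw [hd]
      simp

-- ---------- A's inner loop, seen through the keys it touches ----------

theorem pv_upd_inner (h : Int) (M : List Int) :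
    ∀ S : PySem.Set Int,
      S.update (M.flatMap (fun m2 => if h ≠ m2 then [h, m2] else [])) =
        if M.all (· == h) then S else (S.add h).update M := by
  induction M with
  | nil => intro S; simp [PySem.Set.update_nil]
  | cons x M ih =>
    intro S
    by_cases hx : x = h
    · subst hx
      rw [List.flatMap_cons, if_neg (by simp)]
      rw [List.nil_append, ih S]
      simp only [List.all_cons, BEq.rfl, Bool.true_and]
      by_cases hall : M.all (· == x)
      · rw [if_pos hall, if_pos hall]
      · rw [if_neg (by simp [hall]), if_neg (by simp [hall]), PySem.Set.update_cons, pv_add_idem]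
    · have hhx : h ≠ x := fun e => hx e.symm
      rw [List.flatMap_cons, if_pos hhx, PySem.Set.update_append]
      have hupd2 : (S.update [h, x]) = (S.add h).add x := by
        rw [PySem.Set.update_cons, PySem.Set.update_cons, PySem.Set.update_nil]
      rw [hupd2, ih]
      have hall : (x :: M).all (· == h) = false := by
        simp [List.all_cons]
        intro e; exact absurd e hx
      rw [hall]
      simp only [Bool.false_eq_true, if_false]
      by_cases hM : M.all (· == h)
      · rw [if_pos hM, PySem.Set.update_cons]
        symm
        apply pv_update_noop
        intro z hz
        have hz' : z = h := beq_iff_eq.1 (List.all_eq_true.1 hM z hz)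
        subst hz'
        exact (PySem.Set.mem_add _ _ _).2 (Or.inl ((PySem.Set.mem_add _ _ _).2 (Or.inr rfl)))
      · rw [if_neg hM, PySem.Set.update_cons]
        have hidem : ((S.add h).add x).add h = (S.add h).add x :=
          PySem.Set.add_of_mem
            ((PySem.Set.mem_add _ _ _).2 (Or.inl ((PySem.Set.mem_add _ _ _).2 (Or.inr rfl))))
        rw [hidem]

theorem pv_fold_noop_add (L : List Int) :
    ∀ (Q : List Int) (S : PySem.Set Int), (∀ z ∈ L, z ∈ S) → (∀ x ∈ Q, x ∈ L) →
      Q.foldl (fun S m1 => (S.add m1).update L) S = S := by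
  intro Q
  induction Q with
  | nil => intro S _ _; rfl
  | cons x Q ih =>
    intro S hL hQ
    rw [List.foldl_cons]
    have hx : x ∈ S := hL x (hQ x List.mem_cons_self)
    rw [PySem.Set.add_of_mem hx, pv_update_noop hL]
    exact ih S hL (fun z hz => hQ z (List.mem_cons_of_mem _ hz))

theorem pv_keys_stream (L : List Int) (K : PySem.Set Int) :
    K.update ((pvPairs L).map Prod.fst) =
      if (PySem.Set.ofList L).length < 2 then K else K.update L := by
  have hmap : (pvPairs L).map Prod.fst =
      L.flatMap (fun m1 => L.flatMap (fun m2 => if m1 ≠ m2 then [m1, m2] else [])) := by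
    simp only [pvPairs, List.map_flatMap]
    refine List.flatMap_congr ?_
    intro m1 _
    refine List.flatMap_congr ?_
    intro m2 _
    by_cases h : m1 = m2 <;> simp [pvBlock, h]
  rw [hmap, pv_update_flatMap]
  by_cases hc : (PySem.Set.ofList L).length < 2
  · rw [if_pos hc]
    have hAll := (pv_short_iff L).1 hc
    have hid : L.foldl
        (fun S m1 => S.update (L.flatMap fun m2 => if m1 ≠ m2 then [m1, m2] else [])) K
        = L.foldl (fun S _ => S) K := by
      apply PySem.List.foldl_congr_mem
      intro S m1 hm1
      rw [pv_upd_inner, if_pos]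
      exact List.all_eq_true.2 (fun y hy => beq_iff_eq.2 (hAll y hy m1 hm1))
    rw [hid, PySem.List.foldl_ignore]
  · rw [if_neg hc]
    have hne : ∃ x ∈ L, ∃ y ∈ L, x ≠ y := by
      by_contra hcon
      push Not at hcon
      exact hc ((pv_short_iff L).2 hcon)
    obtain ⟨x, hx, y, hy, hxy⟩ := hne
    have hstep : L.foldl
        (fun S m1 => S.update (L.flatMap fun m2 => if m1 ≠ m2 then [m1, m2] else [])) K
        = L.foldl (fun S m1 => (S.add m1).update L) K := by
      apply PySem.List.foldl_congr_mem
      intro S m1 hm1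
      rw [pv_upd_inner, if_neg]
      intro hall
      have h1 := beq_iff_eq.1 (List.all_eq_true.1 hall x hx)
      have h2 := beq_iff_eq.1 (List.all_eq_true.1 hall y hy)
      exact hxy (h1.trans h2.symm)
    rw [hstep]
    rcases L with _ | ⟨h, L'⟩
    · exact absurd (by simp [PySem.Set.ofList_nil]) hc
    · rw [List.foldl_cons]
      have hsub : ∀ z ∈ h :: L', z ∈ (K.add h).update (h :: L') :=
        fun z hz => (PySem.Set.mem_update _ _ _).2 (Or.inr hz)
      rw [pv_fold_noop_add (h :: L') L' ((K.add h).update (h :: L')) hsub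
        (fun z hz => List.mem_cons_of_mem _ hz)]
      rw [PySem.Set.update_cons, PySem.Set.update_cons, pv_add_idem]

-- ---------- A's action stream, seen through a single key k ----------

theorem pv_getD_process (ps : List (Int × Int)) :
    ∀ (rel : PySem.Dict Int (PySem.Set Int)) (k : Int),
      (pvProcess rel ps).getD k PySem.Set.empty =
        (rel.getD k PySem.Set.empty).update ((ps.filter (fun p => p.1 == k)).map Prod.snd) := by
  induction ps with
  | nil => intro rel k; simp [pvProcess, PySem.Set.update_nil]
  | cons p ps ih =>
    intro rel k
    rcases p with ⟨p1, p2⟩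
    show (pvProcess (rel.modify p1 PySem.Set.empty (fun s => s.add p2)) ps).getD k
      PySem.Set.empty = _
    rw [ih]
    by_cases hk : p1 = k
    · subst hk
      rw [List.filter_cons_of_pos (by simp), List.map_cons, PySem.Set.update_cons,
        PySem.Dict.getD_modify, if_pos rfl]
    · rw [List.filter_cons_of_neg (by simp [hk]), PySem.Dict.getD_modify,
        if_neg (fun e => hk e.symm)]

theorem pv_block_sec (k m1 m2 : Int) :
    ((pvBlock m1 m2).filter (fun p => p.1 == k)).map Prod.snd = pvSec k m1 m2 := by
  unfold pvBlock pvSec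
  by_cases h12 : m1 = m2
  · simp [h12]
  · rw [if_pos h12, if_pos h12]
    by_cases h1k : m1 = k <;> by_cases h2k : m2 = k <;> simp [h1k, h2k]

theorem pv_sec_push (k : Int) (L : List Int) :
    ((pvPairs L).filter (fun p => p.1 == k)).map Prod.snd =
      L.flatMap (fun m1 => L.flatMap (fun m2 => pvSec k m1 m2)) := by
  simp only [pvPairs, List.filter_flatMap, List.map_flatMap]
  refine List.flatMap_congr ?_
  intro m1 _
  refine List.flatMap_congr ?_
  intro m2 _
  exact pv_block_sec k m1 m2

theorem pv_flatMap_singleton (p : Int → Bool) (L : List Int) :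
    L.flatMap (fun x => if p x then [x] else []) = L.filter p := by
  induction L with
  | nil => rfl
  | cons x L ih => by_cases h : p x <;> simp [h, ih]

theorem pv_sec_self (k : Int) (L : List Int) :
    L.flatMap (fun m2 => pvSec k k m2) = L.filter (fun o => o ≠ k) := by
  have hcongr : L.flatMap (fun m2 => pvSec k k m2) =
      L.flatMap (fun m2 => if (fun o => decide (o ≠ k)) m2 then [m2] else []) := by
    refine List.flatMap_congr ?_
    intro m2 _
    by_cases h : m2 = k
    · subst h; simp [pvSec]
    · have h' : ¬k = m2 := fun e => h e.symm
      simp [pvSec, h, h']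
  rw [hcongr, pv_flatMap_singleton]

theorem pv_sec_ne (k h : Int) (hne : h ≠ k) (L : List Int) :
    ∀ S : PySem.Set Int,
      S.update (L.flatMap (fun m2 => pvSec k h m2)) = if k ∈ L then S.add h else S := by
  induction L with
  | nil => intro S; simp [PySem.Set.update_nil]
  | cons x L ih =>
    intro S
    rw [List.flatMap_cons, PySem.Set.update_append]
    by_cases hx : x = k
    · subst hx
      have hsec : pvSec x h x = [h] := by
        have h1 : (h == x) = false := by simp [hne]
        simp [pvSec, hne, h1]
      rw [hsec, show S.update [h] = S.add h from by
        rw [PySem.Set.update_cons, PySem.Set.update_nil], ih]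
      by_cases hKL : x ∈ L
      · rw [if_pos hKL, if_pos List.mem_cons_self, pv_add_idem]
      · rw [if_neg hKL, if_pos List.mem_cons_self]
    · have hsec : pvSec k h x = [] := by
        by_cases hhx : h = x
        · simp [pvSec, hhx]
        · have h2 : (x == k) = false := by simp [hx]
          have h3 : (h == k) = false := by simp [hne]
          simp [pvSec, hhx, h2, h3]
      rw [hsec, PySem.Set.update_nil, ih]
      have hmem : (k ∈ x :: L) ↔ (k ∈ L) := by
        constructor
        · intro hc
          rcases List.mem_cons.1 hc with e | hM
          · exact absurd e.symm hx
          · exact hM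
        · exact List.mem_cons_of_mem x
      by_cases hKL : k ∈ L
      · rw [if_pos hKL, if_pos (hmem.2 hKL)]
      · rw [if_neg hKL, if_neg (fun hc => hKL (hmem.1 hc))]

theorem pv_exists_split {k : Int} {M : List Int} (h : k ∈ M) :
    ∃ P Q, M = P ++ k :: Q ∧ k ∉ P := by
  induction M with
  | nil => cases h
  | cons x M ih =>
    by_cases hx : x = k
    · exact ⟨[], M, by rw [hx]; rfl, by simp⟩
    · have hM : k ∈ M := by
        rcases List.mem_cons.1 h with e | hM
        · exact absurd e.symm hx
        · exact hM
      obtain ⟨P, Q, hPQ, hkP⟩ := ih hM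
      exact ⟨x :: P, Q, by simp [hPQ], by
        intro hc
        rcases List.mem_cons.1 hc with e | hP
        · exact hx e.symm
        · exact hkP hP⟩

theorem pv_fold_noop_sec (k : Int) (F : List Int) :
    ∀ (Q : List Int) (S : PySem.Set Int),
      (∀ z ∈ F, z ∈ S) → (∀ x ∈ Q, x = k ∨ x ∈ F) →
      Q.foldl (fun S m1 => if m1 = k then S.update F else S.add m1) S = S := by
  intro Q
  induction Q with
  | nil => intro S _ _; rfl
  | cons x Q ih =>
    intro S hFS hQ
    rw [List.foldl_cons]
    rcases hQ x List.mem_cons_self with hx | hx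
    · rw [if_pos hx, pv_update_noop hFS]
      exact ih S hFS fun z hz => hQ z (List.mem_cons_of_mem _ hz)
    · by_cases hxk : x = k
      · rw [if_pos hxk, pv_update_noop hFS]
        exact ih S hFS fun z hz => hQ z (List.mem_cons_of_mem _ hz)
      · rw [if_neg hxk, PySem.Set.add_of_mem (hFS x hx)]
        exact ih S hFS fun z hz => hQ z (List.mem_cons_of_mem _ hz)

theorem pv_sec_outer (k : Int) (L : List Int) (hk : k ∈ L) (S : PySem.Set Int) :
    L.foldl (fun S m1 => if m1 = k then S.update (L.filter (fun o => o ≠ k)) else S.add m1) S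
      = S.update (L.filter (fun o => o ≠ k)) := by
  obtain ⟨P, Q, hPQ, hkP⟩ := pv_exists_split hk
  have hF : L.filter (fun o => o ≠ k) = P ++ Q.filter (fun o => o ≠ k) := by
    rw [hPQ, List.filter_append, List.filter_cons_of_neg (by simp)]
    congr 1
    apply List.filter_eq_self.2
    intro a ha
    have hak : a ≠ k := fun e => hkP (by rw [← e]; exact ha)
    simp [hak]
  have hQmem : ∀ x ∈ Q, x = k ∨ x ∈ L.filter (fun o => o ≠ k) := by
    intro x hx
    by_cases hxk : x = k
    · exact Or.inl hxk
    · refine Or.inr (List.mem_filter.2 ⟨?_, by simp [hxk]⟩)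
      rw [hPQ]
      exact List.mem_append.2 (Or.inr (List.mem_cons_of_mem _ hx))
  have hPm : ∀ x ∈ P, x ≠ k := fun x hx e => hkP (by rw [← e]; exact hx)
  generalize hFg : L.filter (fun o => o ≠ k) = F at hF hQmem ⊢
  rw [hPQ, List.foldl_append, List.foldl_cons]
  have hPfold : P.foldl (fun S m1 => if m1 = k then S.update F else S.add m1) S
      = S.update P := by
    have hc : P.foldl (fun S m1 => if m1 = k then S.update F else S.add m1) S
        = P.foldl (fun S m1 => S.add m1) S := by
      apply PySem.List.foldl_congr_mem
      intro S' m1 hm1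
      rw [if_neg (hPm m1 hm1)]
    rw [hc]
    rfl
  rw [hPfold, if_pos rfl]
  have hQfold : Q.foldl (fun S m1 => if m1 = k then S.update F else S.add m1)
      ((S.update P).update F) = (S.update P).update F := by
    apply pv_fold_noop_sec k F
    · exact fun z hz => (PySem.Set.mem_update _ _ _).2 (Or.inr hz)
    · exact hQmem
  rw [hQfold, hF, PySem.Set.update_append, PySem.Set.update_append, pv_update_idem]

theorem pv_getD_A (L : List Int) (rel : PySem.Dict Int (PySem.Set Int)) (k : Int) :
    (pvProcess rel (pvPairs L)).getD k PySem.Set.empty =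
      if k ∈ L then (rel.getD k PySem.Set.empty).update (L.filter (fun o => o ≠ k))
      else rel.getD k PySem.Set.empty := by
  rw [pv_getD_process, pv_sec_push, pv_update_flatMap]
  by_cases hk : k ∈ L
  · rw [if_pos hk]
    have hcongr : L.foldl
        (fun S m1 => S.update (L.flatMap fun m2 => pvSec k m1 m2)) (rel.getD k PySem.Set.empty)
        = L.foldl
          (fun S m1 => if m1 = k then S.update (L.filter (fun o => o ≠ k)) else S.add m1)
          (rel.getD k PySem.Set.empty) := by
      apply PySem.List.foldl_congr_mem
      intro S m1 hm1
      by_cases h1 : m1 = k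
      · subst h1
        rw [pv_sec_self, if_pos rfl]
      · rw [pv_sec_ne k m1 h1, if_pos hk, if_neg h1]
    rw [hcongr, pv_sec_outer k L hk]
  · rw [if_neg hk]
    have hcongr : L.foldl
        (fun S m1 => S.update (L.flatMap fun m2 => pvSec k m1 m2)) (rel.getD k PySem.Set.empty)
        = L.foldl (fun S _ => S) (rel.getD k PySem.Set.empty) := by
      apply PySem.List.foldl_congr_mem
      intro S m1 hm1
      have h1 : m1 ≠ k := fun e => hk (by rw [← e]; exact hm1)
      rw [pv_sec_ne k m1 h1, if_neg hk]
    rw [hcongr, PySem.List.foldl_ignore]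

theorem pv_stepA_eq_process (rel : PySem.Dict Int (PySem.Set Int)) (L : List Int) :
    pvStepA rel L = pvProcess rel (pvPairs L) := by
  unfold pvStepA pvProcess pvPairs
  rw [List.foldl_flatMap]
  apply PySem.List.foldl_congr_mem
  intro rel' m1 _
  rw [List.foldl_flatMap]
  apply PySem.List.foldl_congr_mem
  intro rel'' m2 _
  by_cases h : m1 = m2 <;> simp [pvBlock, h]

-- ---------- B's index fold, key by key ----------

theorem pv_getD_I_out (f : Int → List Int) (D : List Int) :
    ∀ (idx : PySem.Dict Int (List (List Int))) (k : Int), k ∉ D →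
      (D.foldl (fun idx m =>
        idx.insert m ((idx.getD m []) ++ [f m])) idx).getD k []
        = idx.getD k [] := by
  induction D with
  | nil => intro idx k _; rfl
  | cons m D ih =>
    intro idx k hk
    rw [List.foldl_cons, ih _ _ (fun h => hk (List.mem_cons_of_mem _ h)),
      PySem.Dict.getD_insert, if_neg (fun e => hk (by rw [e]; exact List.mem_cons_self))]

theorem pv_getD_I (f : Int → List Int) (D : List Int) :
    ∀ (idx : PySem.Dict Int (List (List Int))) (k : Int), D.Nodup →
      (D.foldl (fun idx m =>
        idx.insert m ((idx.getD m []) ++ [f m])) idx).getD k []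
        = if k ∈ D then idx.getD k [] ++ [f k] else idx.getD k [] := by
  induction D with
  | nil => intro idx k _; rfl
  | cons m D ih =>
    intro idx k hnd
    rw [List.foldl_cons]
    by_cases hk : k = m
    · subst hk
      have hkD : k ∉ D := (List.nodup_cons.1 hnd).1
      rw [pv_getD_I_out f D _ k hkD, PySem.Dict.getD_insert, if_pos rfl,
        if_pos List.mem_cons_self]
    · rw [ih _ _ (List.nodup_cons.1 hnd).2, PySem.Dict.getD_insert, if_neg hk]
      by_cases hkD : k ∈ D
      · rw [if_pos hkD, if_pos (List.mem_cons_of_mem _ hkD)]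
      · rw [if_neg hkD, if_neg (by
          intro hc
          rcases List.mem_cons.1 hc with e | h
          · exact hk e
          · exact hkD h)]

-- ---------- per-group step preservation of the invariant ----------

theorem pv_step_keys (rel : PySem.Dict Int (PySem.Set Int))
    (idx : PySem.Dict Int (List (List Int))) (L : List Int)
    (hkeq : rel.keys = idx.keys) : (pvStepA rel L).keys = (pvStepI idx L).keys := by
  rw [pv_stepA_eq_process]
  have hA : (pvProcess rel (pvPairs L)).keys =
      PySem.Set.update rel.keys ((pvPairs L).map Prod.fst) :=
    PySem.Dict.keys_foldl_modify_key (pvPairs L) Prod.fst PySem.Set.empty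
      (fun d p s => s.add p.2) rel
  rw [hA, pv_keys_stream]
  unfold pvStepI
  by_cases hq : 2 ≤ (PySem.List.dedup L).length
  · rw [if_pos hq, if_neg (by rw [PySem.List.dedup_eq_ofList] at hq; omega),
      PySem.Dict.keys_foldl_insert, hkeq]
    apply pv_update_congr
    rw [PySem.List.dedup_eq_ofList, PySem.Set.ofList_ofList]
  · rw [if_neg hq, if_pos (by rw [PySem.List.dedup_eq_ofList] at hq; omega), hkeq]

theorem pv_step_getD (rel : PySem.Dict Int (PySem.Set Int))
    (idx : PySem.Dict Int (List (List Int))) (L : List Int) (k : Int)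
    (hval : rel.getD k PySem.Set.empty = PySem.Set.ofList ((idx.getD k []).flatten)) :
    (pvStepA rel L).getD k PySem.Set.empty =
      PySem.Set.ofList (((pvStepI idx L).getD k []).flatten) := by
  rw [pv_stepA_eq_process, pv_getD_A]
  unfold pvStepI
  have hmem : (k ∈ PySem.List.dedup L) ↔ (k ∈ L) := by
    rw [PySem.List.dedup_eq_ofList]; exact PySem.Set.mem_ofList L k
  by_cases hq : 2 ≤ (PySem.List.dedup L).length
  · rw [if_pos hq,
      pv_getD_I _ _ _ _ (by rw [PySem.List.dedup_eq_ofList]; exact PySem.Set.nodup_ofList L)]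
    by_cases hk : k ∈ L
    · rw [if_pos hk, if_pos (hmem.2 hk), List.flatten_append, List.flatten_cons,
        List.flatten_nil, List.append_nil, PySem.Set.ofList_append, hval]
      apply pv_update_congr
      rw [pv_ofList_filter, pv_ofList_filter, PySem.List.dedup_eq_ofList,
        PySem.Set.ofList_ofList]
    · rw [if_neg hk, if_neg (fun h => hk (hmem.1 h)), hval]
  · rw [if_neg hq]
    by_cases hk : k ∈ L
    · rw [if_pos hk]
      have hshort : (PySem.Set.ofList L).length < 2 := by
        rw [PySem.List.dedup_eq_ofList] at hq; omega
      have hnil : L.filter (fun o => o ≠ k) = [] := by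
        rw [List.filter_eq_nil_iff]
        intro a ha
        have : a = k := (pv_short_iff L).1 hshort a ha k hk
        simp [this]
      rw [hnil, PySem.Set.update_nil, hval]
    · rw [if_neg hk, hval]

theorem pv_step_nodup (rel : PySem.Dict Int (PySem.Set Int)) (L : List Int)
    (hn : rel.keys.Nodup) : (pvStepA rel L).keys.Nodup := by
  rw [pv_stepA_eq_process]
  exact PySem.Dict.nodup_keys_foldl_modify_key (pvPairs L) Prod.fst PySem.Set.empty
    (fun d p s => s.add p.2) rel hn

-- ---------- the whole fold ----------

theorem pv_fold_inv (gs : List (String × List Int)) :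
    ∀ (rel : PySem.Dict Int (PySem.Set Int)) (idx : PySem.Dict Int (List (List Int))),
      rel.keys.Nodup → rel.keys = idx.keys →
      (∀ k, rel.getD k PySem.Set.empty = PySem.Set.ofList ((idx.getD k []).flatten)) →
      (gs.foldl (fun rel g => pvStepA rel g.2) rel).keys.Nodup ∧
      (gs.foldl (fun rel g => pvStepA rel g.2) rel).keys =
        (gs.foldl (fun idx g => pvStepI idx g.2) idx).keys ∧
      (∀ k, (gs.foldl (fun rel g => pvStepA rel g.2) rel).getD k PySem.Set.empty =
        PySem.Set.ofList (((gs.foldl (fun idx g => pvStepI idx g.2) idx).getD k []).flatten)) := by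
  induction gs with
  | nil => intro rel idx hn hkeq hval; exact ⟨hn, hkeq, hval⟩
  | cons g gs ih =>
    intro rel idx hn hkeq hval
    rw [List.foldl_cons, List.foldl_cons]
    exact ih (pvStepA rel g.2) (pvStepI idx g.2) (pv_step_nodup rel g.2 hn)
      (pv_step_keys rel idx g.2 hkeq) (fun k => pv_step_getD rel idx g.2 k (hval k))

theorem pv_main (gs : List (String × List Int)) :
    build_relationships_py gs = build_relationships_py_alt gs := by
  show (gs.foldl (fun rel g => pvStepA rel g.2) PySem.Dict.empty).items
    = ((gs.foldl (fun idx g => pvStepI idx g.2) PySem.Dict.empty).items).map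
        (fun p => (p.1, PySem.Set.ofList p.2.flatten))
  obtain ⟨hnA, hkeq, hval⟩ := pv_fold_inv gs PySem.Dict.empty PySem.Dict.empty
    PySem.Dict.nodup_keys_empty rfl (fun k => rfl)
  have hnI : (gs.foldl (fun idx g => pvStepI idx g.2) PySem.Dict.empty).keys.Nodup := by
    rw [← hkeq]; exact hnA
  rw [PySem.Dict.items_eq_map_keys _ hnA PySem.Set.empty,
    PySem.Dict.items_eq_map_keys _ hnI ([] : List (List Int)), List.map_map, hkeq]
  apply List.map_congr_left
  intro k hk
  show (k, _) = (k, _)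
  rw [hval k]

-- ===== VERDICT (by name: the statement is the Claim_ definition above) =====
theorem build_relationships_py_spec : Claim_equal_build_relationships_py := by
  intro gs _
  unfold Spec_build_relationships_py
  exact pv_main gs
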